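-- pv_equiv track=rewrite | github.com/Nuloi/https-github.com-Nuloi-baekjoon | 백준/Silver/18111. 마인크래프트/마인크래프트.py | calc_bt
-- ===== SOURCE A (Python) =====
-- def calc_bt(N, M, t_h, l_h):
--     r_b, rm_b = 0, 0
--
--     for i in range(N):
--         for j in range(M):
--             d = l_h[i][j] - t_h
--             if d > 0:
--                 rm_b += d
--             else:
--                 r_b -= d
--
--     t = rm_b * 2 + r_b
--     return r_b, rm_b, t
-- ===== SOURCE B (Python) =====
-- def calc_bt(N, M, t_h, l_h):
--     cells = [l_h[i][j] for i in range(N) for j in range(M)]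
--     high = [h for h in cells if h > t_h]
--     rm_b = sum(high) - t_h * len(high)
--     r_b = t_h * (len(cells) - len(high)) - (sum(cells) - sum(high))
--     return r_b, rm_b, rm_b * 2 + r_b
-- ===== Notes on version B (the rewrite author's own statement) =====
-- stated objective: alternative
-- what changed: B flattens the grid once, filters out the cells above the target height, and computes both block totals by closed-form arithmetic on aggregates (sums and lengths) instead of A's per-cell branch-and-accumulate loop.
import Mathlib
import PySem

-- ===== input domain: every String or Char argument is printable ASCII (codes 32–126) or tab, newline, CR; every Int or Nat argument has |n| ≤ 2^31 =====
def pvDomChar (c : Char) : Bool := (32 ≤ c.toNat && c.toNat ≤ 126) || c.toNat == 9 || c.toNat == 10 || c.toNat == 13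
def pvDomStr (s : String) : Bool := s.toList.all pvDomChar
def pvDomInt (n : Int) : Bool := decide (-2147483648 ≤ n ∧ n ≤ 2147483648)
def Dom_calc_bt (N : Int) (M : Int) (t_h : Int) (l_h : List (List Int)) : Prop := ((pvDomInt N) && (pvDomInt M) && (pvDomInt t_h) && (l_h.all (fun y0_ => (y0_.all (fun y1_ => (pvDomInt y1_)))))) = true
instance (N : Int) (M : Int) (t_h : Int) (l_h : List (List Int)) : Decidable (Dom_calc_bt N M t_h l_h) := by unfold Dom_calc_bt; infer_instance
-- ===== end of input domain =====

-- B flattens the grid once, filters the cells above the target height, and gets both block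
-- totals by closed-form arithmetic on sums/lengths; objective: alternative (no speed claim).

-- ===== PORT A =====
-- A's loop body: d = l_h[i][j] - t_h; the branch updates (r_b, rm_b)
def calc_bt_step (t_h : Int) (st : Int × Int) (h : Int) : Int × Int :=
  let d := h - t_h
  if d > 0 then (st.1, st.2 + d) else (st.1 - d, st.2)

def calc_bt (N : Int) (M : Int) (t_h : Int) (l_h : List (List Int)) : Int × Int × Int :=
  let st :=
    (PySem.List.pyRange 0 N 1).foldl (fun st i =>
      (PySem.List.pyRange 0 M 1).foldl (fun st j =>
        calc_bt_step t_h st (PySem.List.pyGetD (PySem.List.pyGetD l_h i []) j 0)) st) (0, 0)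
  (st.1, st.2, st.2 * 2 + st.1)

-- ===== PORT B =====
def calc_bt_alt (N : Int) (M : Int) (t_h : Int) (l_h : List (List Int)) : Int × Int × Int :=
  let cells := (PySem.List.pyRange 0 N 1).flatMap (fun i =>
    (PySem.List.pyRange 0 M 1).map (fun j =>
      PySem.List.pyGetD (PySem.List.pyGetD l_h i []) j 0))
  let high := cells.filter (fun h => h > t_h)
  let rm_b := high.sum - t_h * (high.length : Int)
  let r_b := t_h * ((cells.length : Int) - (high.length : Int)) - (cells.sum - high.sum)
  (r_b, rm_b, rm_b * 2 + r_b)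

-- ===== PRECONDITION & SPEC =====
-- Pre_ excludes exactly the inputs on which A raises IndexError: with both loop ranges
-- nonempty, every visited row index and column index must be in range.
def Pre_calc_bt (N : Int) (M : Int) (t_h : Int) (l_h : List (List Int)) : Prop :=
  0 < N → 0 < M → N ≤ (l_h.length : Int) ∧ ∀ r ∈ l_h.take N.toNat, M ≤ (r.length : Int)
instance (N : Int) (M : Int) (t_h : Int) (l_h : List (List Int)) : Decidable (Pre_calc_bt N M t_h l_h) := by unfold Pre_calc_bt; infer_instance

def pvWitness_calc_bt : Int × Int × Int × List (List Int) := (2, 2, 3, [[1, 5], [3, 2]])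

def Spec_calc_bt (N : Int) (M : Int) (t_h : Int) (l_h : List (List Int)) (out : Int × Int × Int) : Prop := out = calc_bt_alt N M t_h l_h
instance (N : Int) (M : Int) (t_h : Int) (l_h : List (List Int)) (out : Int × Int × Int) : Decidable (Spec_calc_bt N M t_h l_h out) := by unfold Spec_calc_bt; infer_instance

-- ===== CLAIM (what is proved, stated in full; the proofs are below) =====
def Claim_equal_calc_bt : Prop := ∀ (N : Int) (M : Int) (t_h : Int) (l_h : List (List Int)), Dom_calc_bt N M t_h l_h → Pre_calc_bt N M t_h l_h → Spec_calc_bt N M t_h l_h (calc_bt N M t_h l_h)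

-- ===== LEMMAS AND PROOFS =====

-- pyRange 0 N 1 for any Int N, including N ≤ 0
theorem pv_pyRange_int (N : Int) :
    PySem.List.pyRange 0 N 1 = (List.range N.toNat).map (fun k : Nat => (k : Int)) := by
  by_cases h : N ≤ 0
  · have h0 : N.toNat = 0 := by omega
    simp [PySem.List.pyRange, h0]
  · have hN : N = ((N.toNat : Nat) : Int) := by omega
    rw [hN, PySem.List.pyRange_zero_natCast]
    congr 2

-- the inner loop over j reads exactly the first m elements of the row
theorem pv_row_fold {σ : Type} (g : σ → Int → σ) (m : Nat) (row : List Int) (st : σ)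
    (hM : m ≤ row.length) :
    ((List.range m).map (fun k : Nat => (k : Int))).foldl
      (fun st j => g st (PySem.List.pyGetD row j 0)) st
      = (row.take m).foldl g st := by
  induction m generalizing st with
  | zero => simp
  | succ m ih =>
    have hm : m < row.length := by omega
    rw [List.range_succ, List.map_append, List.foldl_append, ih st (by omega)]
    have hts : row.take (m + 1) = row.take m ++ [row[m]] := by
      rw [List.take_add_one, List.getElem?_eq_getElem hm]
      rfl
    rw [hts, List.foldl_append]
    simp [PySem.List.pyGetD_natCast, List.getD_eq_getElem?_getD, List.getElem?_eq_getElem hm]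

-- the two nested loops visit exactly the first m cells of the first n rows, left to right
theorem pv_nested_fold {σ : Type} (g : σ → Int → σ) (n m : Nat) (l_h : List (List Int))
    (init : σ) (hN : n ≤ l_h.length) (hM : ∀ r ∈ l_h.take n, m ≤ r.length) :
    ((List.range n).map (fun k : Nat => (k : Int))).foldl (fun st i =>
      ((List.range m).map (fun k : Nat => (k : Int))).foldl (fun st j =>
        g st (PySem.List.pyGetD (PySem.List.pyGetD l_h i []) j 0)) st) init
      = ((l_h.take n).flatMap (fun r => r.take m)).foldl g init := by
  induction n generalizing init with
  | zero => simp
  | succ n ih =>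
    have hlt : n < l_h.length := by omega
    have hmem : l_h[n] ∈ l_h.take (n + 1) := by
      refine List.mem_take_iff_getElem.mpr ⟨n, ?_, ?_⟩
      · omega
      · simp
    rw [List.range_succ, List.map_append, List.foldl_append,
        ih init (by omega) (fun r hr => hM r (List.take_subset n _
          (by rw [List.take_take]; simpa using hr))),
        List.take_succ, List.flatMap_append, List.foldl_append]
    simp only [List.map_cons, List.map_nil, List.foldl_cons, List.foldl_nil,
      List.getElem?_eq_getElem hlt, Option.toList_some, List.flatMap_cons, List.flatMap_nil,
      List.append_nil]
    rw [PySem.List.pyGetD_natCast, List.getD_eq_getElem?_getD, List.getElem?_eq_getElem hlt]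
    exact pv_row_fold g m l_h[n] _ (hM l_h[n] hmem)

-- B's comprehension builds exactly the first m cells of the first n rows, left to right
theorem pv_cells_eq (n m : Nat) (l_h : List (List Int))
    (hN : n ≤ l_h.length) (hM : ∀ r ∈ l_h.take n, m ≤ r.length) :
    ((List.range n).map (fun k : Nat => (k : Int))).flatMap (fun i =>
      ((List.range m).map (fun k : Nat => (k : Int))).map (fun j =>
        PySem.List.pyGetD (PySem.List.pyGetD l_h i []) j 0))
      = (l_h.take n).flatMap (fun r => r.take m) := by
  induction n with
  | zero => simp
  | succ n ih =>
    have hlt : n < l_h.length := by omega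
    have hmem : l_h[n] ∈ l_h.take (n + 1) := by
      refine List.mem_take_iff_getElem.mpr ⟨n, ?_, ?_⟩
      · omega
      · simp
    rw [List.range_succ, List.map_append, List.flatMap_append,
        ih (by omega) (fun r hr => hM r (List.take_subset n _
          (by rw [List.take_take]; simpa using hr))),
        List.take_succ, List.flatMap_append]
    congr 1
    simp only [List.map_cons, List.map_nil, List.flatMap_cons, List.flatMap_nil,
      List.append_nil, List.getElem?_eq_getElem hlt, Option.toList_some]
    rw [PySem.List.pyGetD_natCast, List.getD_eq_getElem?_getD, List.getElem?_eq_getElem hlt]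
    have hrow : m ≤ l_h[n].length := hM l_h[n] hmem
    -- row-level: mapping pyGetD over range m = take m
    clear hmem hM hN ih
    generalize l_h[n] = row at hrow ⊢
    induction m with
    | zero => simp
    | succ m ihm =>
      have hm : m < row.length := by omega
      rw [List.range_succ, List.map_append, List.map_append, ihm (by omega)]
      have hts : row.take (m + 1) = row.take m ++ [row[m]] := by
        rw [List.take_add_one, List.getElem?_eq_getElem hm]
        rfl
      rw [hts]
      congr 1
      simp [PySem.List.pyGetD_natCast, List.getD_eq_getElem?_getD, List.getElem?_eq_getElem hm]

def pv_fpos (t_h h : Int) : Int := if h - t_h > 0 then h - t_h else 0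
def pv_fneg (t_h h : Int) : Int := if h - t_h > 0 then 0 else t_h - h

theorem pv_foldA (t_h : Int) (l : List Int) (a b : Int) :
    l.foldl (calc_bt_step t_h) (a, b)
      = (a + (l.map (pv_fneg t_h)).sum, b + (l.map (pv_fpos t_h)).sum) := by
  induction l generalizing a b with
  | nil => simp
  | cons h l ih =>
    simp only [List.foldl_cons, List.map_cons, List.sum_cons, calc_bt_step]
    split_ifs with hd
    · have h1 : pv_fneg t_h h = 0 := by unfold pv_fneg; rw [if_pos hd]
      have h2 : pv_fpos t_h h = h - t_h := by unfold pv_fpos; rw [if_pos hd]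
      rw [ih, h1, h2, Prod.mk.injEq]
      constructor <;> ring
    · have h1 : pv_fneg t_h h = t_h - h := by unfold pv_fneg; rw [if_neg hd]
      have h2 : pv_fpos t_h h = 0 := by unfold pv_fpos; rw [if_neg hd]
      rw [ih, h1, h2, Prod.mk.injEq]
      constructor <;> ring

-- B's aggregates recover the two branch sums
theorem pv_agg (t_h : Int) (l : List Int) :
    (l.map (pv_fpos t_h)).sum
        = (l.filter (fun h => h > t_h)).sum - t_h * ((l.filter (fun h => h > t_h)).length : Int)
      ∧ (l.map (pv_fneg t_h)).sum
        = t_h * ((l.length : Int) - ((l.filter (fun h => h > t_h)).length : Int))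
            - (l.sum - (l.filter (fun h => h > t_h)).sum) := by
  induction l with
  | nil => simp
  | cons h l ih =>
    by_cases hd : h > t_h
    · have h1 : pv_fpos t_h h = h - t_h := by unfold pv_fpos; rw [if_pos (by omega)]
      have h2 : pv_fneg t_h h = 0 := by unfold pv_fneg; rw [if_pos (by omega)]
      simp only [List.map_cons, List.sum_cons, List.filter_cons, decide_eq_true_eq, if_pos hd,
        List.length_cons, h1, h2]
      push_cast
      constructor <;> [rw [ih.1]; rw [ih.2]] <;> ring
    · have h1 : pv_fpos t_h h = 0 := by unfold pv_fpos; rw [if_neg (by omega)]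
      have h2 : pv_fneg t_h h = t_h - h := by unfold pv_fneg; rw [if_neg (by omega)]
      simp only [List.map_cons, List.sum_cons, List.filter_cons, decide_eq_true_eq, if_neg hd,
        List.length_cons, h1, h2]
      push_cast
      constructor <;> [rw [ih.1]; rw [ih.2]] <;> ring

-- ===== VERDICT (by name: the statement is the Claim_ definition above) =====
theorem calc_bt_spec : Claim_equal_calc_bt := by
  intro N M t_h l_h _ hpre
  unfold Spec_calc_bt calc_bt calc_bt_alt
  by_cases hM0 : 0 < M
  · have hNn : N.toNat ≤ l_h.length := by
      by_cases h0 : 0 < N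
      · have := (hpre h0 hM0).1; omega
      · omega
    have hMm : ∀ r ∈ l_h.take N.toNat, M.toNat ≤ r.length := by
      intro r hr
      by_cases h0 : 0 < N
      · have := (hpre h0 hM0).2 r hr; omega
      · have hz : N.toNat = 0 := by omega
        rw [hz] at hr; simp at hr
    simp only [pv_pyRange_int]
    rw [pv_nested_fold (calc_bt_step t_h) N.toNat M.toNat l_h (0, 0) hNn hMm,
        pv_cells_eq N.toNat M.toNat l_h hNn hMm, pv_foldA]
    rcases pv_agg t_h ((l_h.take N.toNat).flatMap (fun r => r.take M.toNat)) with ⟨h1, h2⟩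
    rw [h1, h2]
    simp only [Prod.mk.injEq]
    refine ⟨by ring, by ring, by ring⟩
  · have hz : M.toNat = 0 := by omega
    have he : ∀ (L : List Int), L.flatMap (fun _ => ([] : List Int)) = [] := by
      intro L; induction L <;> simp_all
    simp only [pv_pyRange_int, hz, List.range_zero, List.map_nil, List.foldl_nil,
      List.foldl_fixed, he]
    simp
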